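-- pv_equiv track=rewrite | github.com/Galaga0/FM26_Companion_App | fm26_helper_app.py | best_oop_position
-- ===== SOURCE A (Python) =====
-- PITCH_ORDER = [
--     "GK",
--     "LB", "LWB",
--     "CB",
--     "RB", "RWB",
--     "CDM",
--     "CM",
--     "LM", "LW",
--     "RM", "RW",
--     "CAM",
--     "ST",
-- ]
--
-- def position_sort_key(pos: str) -> int:
--     pos_u = (pos or "").upper()
--     return PITCH_ORDER.index(pos_u) if pos_u in PITCH_ORDER else 999
--
-- def best_ip_position(player: dict):
--     """Best IP position (tie-broken by pitch order)."""
--     pos_ratings = player.get("position_ratings") or {}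
--     if not pos_ratings:
--         return None
--     best_val = max(pos_ratings.values())
--     best_positions = [pos for pos, val in pos_ratings.items() if val == best_val]
--     best_positions.sort(key=position_sort_key)
--     return best_positions[0] if best_positions else None
--
-- def best_oop_position(player: dict):
--     """Best OOP position (tie-broken by pitch order, falls back to IP)."""
--     pos_ratings_oop = player.get("position_ratings_oop") or {}
--     if not pos_ratings_oop:
--         return best_ip_position(player)
--     best_val = max(pos_ratings_oop.values())
--     best_positions = [pos for pos, val in pos_ratings_oop.items() if val == best_val]
--     best_positions.sort(key=position_sort_key)
--     return best_positions[0] if best_positions else None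
-- ===== SOURCE B (Python) =====
-- PITCH_ORDER = [
--     "GK",
--     "LB", "LWB",
--     "CB",
--     "RB", "RWB",
--     "CDM",
--     "CM",
--     "LM", "LW",
--     "RM", "RW",
--     "CAM",
--     "ST",
-- ]
--
-- _ORDER_INDEX = {p: i for i, p in enumerate(PITCH_ORDER)}
--
--
-- def _pos_key(pos: str) -> int:
--     return _ORDER_INDEX.get((pos or "").upper(), 999)
--
--
-- def _best_of(pos_ratings):
--     """Single pass: keep the (pos, val) with highest val, ties by pitch order (first wins)."""
--     best = None
--     for pos, val in (pos_ratings or {}).items():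
--         if best is None or val > best[1] or (val == best[1] and _pos_key(pos) < _pos_key(best[0])):
--             best = (pos, val)
--     return best
--
--
-- def best_oop_position(player: dict):
--     """Best OOP position (tie-broken by pitch order, falls back to IP)."""
--     best = _best_of(player.get("position_ratings_oop")) or _best_of(player.get("position_ratings"))
--     return best[0] if best else None
-- ===== Notes on version B (the rewrite author's own statement) =====
-- stated objective: simpler
-- what changed: Replaces the max-values pass, the filter pass and the stable sort with one running-best scan over the items (seeded by the first item, replaced on strictly higher value or equal value with strictly smaller pitch-order key), and replaces the list.index scan inside the sort key with a precomputed position->index dict; the empty-OOP fallback to the IP ratings is kept via a single 'or'.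
import Mathlib
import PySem

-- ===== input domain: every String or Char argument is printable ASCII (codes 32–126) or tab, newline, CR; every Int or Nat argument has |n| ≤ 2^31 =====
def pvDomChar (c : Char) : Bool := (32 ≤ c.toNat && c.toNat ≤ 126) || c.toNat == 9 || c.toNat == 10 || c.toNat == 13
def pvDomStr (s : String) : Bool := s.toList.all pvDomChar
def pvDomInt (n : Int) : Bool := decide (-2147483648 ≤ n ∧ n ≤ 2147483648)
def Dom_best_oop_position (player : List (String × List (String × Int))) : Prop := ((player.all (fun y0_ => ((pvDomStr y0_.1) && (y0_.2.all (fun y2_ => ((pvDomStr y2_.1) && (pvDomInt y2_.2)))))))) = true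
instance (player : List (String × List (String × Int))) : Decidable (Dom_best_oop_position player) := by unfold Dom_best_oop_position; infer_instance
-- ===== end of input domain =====

-- B folds A's max/filter/stable-sort passes into one running-best scan over the items (dict-indexed sort key); return value proved equal on all inputs.


-- ===== PORT A =====
def PITCH_ORDER : List String :=
  ["GK", "LB", "LWB", "CB", "RB", "RWB", "CDM", "CM", "LM", "LW", "RM", "RW", "CAM", "ST"]

-- (pos or "").upper() = pos.upper() on strings ('' or '' is ''); 'index if in else 999' is a match on index?
def position_sort_key (pos : String) : Int :=
  let pos_u := PySem.Str.upper pos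
  match PySem.List.index? PITCH_ORDER pos_u with
  | some i => (i : Int)
  | none => 999

def best_ip_position (player : List (String × List (String × Int))) : Option String :=
  let pos_ratings := PySem.Dict.ofList (((PySem.Dict.ofList player).get? "position_ratings").getD [])
  if pos_ratings.items = [] then none
  else
    match PySem.List.max? pos_ratings.values (fun v => v) with
    | none => none  -- unreachable: the dict is nonempty here
    | some best_val =>
      let best_positions := (pos_ratings.items.filter (fun p => p.2 == best_val)).map (·.1)
      (PySem.List.sorted best_positions position_sort_key false).head?

def best_oop_position (player : List (String × List (String × Int))) : Option String :=
  let pos_ratings_oop := PySem.Dict.ofList (((PySem.Dict.ofList player).get? "position_ratings_oop").getD [])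
  if pos_ratings_oop.items = [] then best_ip_position player
  else
    match PySem.List.max? pos_ratings_oop.values (fun v => v) with
    | none => none  -- unreachable: the dict is nonempty here
    | some best_val =>
      let best_positions := (pos_ratings_oop.items.filter (fun p => p.2 == best_val)).map (·.1)
      (PySem.List.sorted best_positions position_sort_key false).head?

-- ===== PORT B =====
def pvOrderIndex : PySem.Dict String Int :=
  PySem.Dict.ofList (PITCH_ORDER.zipIdx.map (fun p => (p.1, (p.2 : Int))))

def pos_key_alt (pos : String) : Int :=
  pvOrderIndex.getD (PySem.Str.upper pos) 999

-- 'best = (pos, val) if val > best[1] or (val == best[1] and key(pos) < key(best[0])) else best'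
def pv_pick (b p : String × Int) : String × Int :=
  if p.2 > b.2 ∨ (p.2 = b.2 ∧ pos_key_alt p.1 < pos_key_alt b.1) then p else b

def pv_best_of (pos_ratings : List (String × Int)) : Option (String × Int) :=
  (PySem.Dict.ofList pos_ratings).items.foldl
    (fun best p =>
      match best with
      | none => some p
      | some b => some (pv_pick b p))
    none

def best_oop_position_alt (player : List (String × List (String × Int))) : Option String :=
  let d := PySem.Dict.ofList player
  let best :=
    match pv_best_of ((d.get? "position_ratings_oop").getD []) with
    | some b => some b
    | none => pv_best_of ((d.get? "position_ratings").getD [])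
  best.map (·.1)

-- ===== PRECONDITION & SPEC =====
def Spec_best_oop_position (player : List (String × List (String × Int))) (out : Option String) : Prop := out = best_oop_position_alt player
instance (player : List (String × List (String × Int))) (out : Option String) : Decidable (Spec_best_oop_position player out) := by unfold Spec_best_oop_position; infer_instance

-- ===== CLAIM (what is proved, stated in full; the proofs are below) =====
def Claim_equal_best_oop_position : Prop := ∀ (player : List (String × List (String × Int))), Dom_best_oop_position player → Spec_best_oop_position player (best_oop_position player)

-- ===== LEMMAS AND PROOFS =====


-- The two sort keys agree on every string.
lemma key_eq (s : String) : pos_key_alt s = position_sort_key s := by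
  unfold pos_key_alt position_sort_key
  generalize PySem.Str.upper s = u
  by_cases h : u ∈ PITCH_ORDER
  · simp only [PITCH_ORDER, List.mem_cons, List.not_mem_nil, or_false] at h
    rcases h with rfl|rfl|rfl|rfl|rfl|rfl|rfl|rfl|rfl|rfl|rfl|rfl|rfl|rfl <;> rfl
  · have hk : pvOrderIndex.keys = PITCH_ORDER := by decide
    have hc : pvOrderIndex.contains u = false := by
      by_contra hcc
      rw [Bool.not_eq_false, PySem.Dict.contains_iff_mem_keys, hk] at hcc
      exact h hcc
    rw [PySem.Dict.getD_of_not_contains pvOrderIndex 999 hc]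
    have hidx : List.idxOf? u PITCH_ORDER = none := List.idxOf?_eq_none_iff.mpr h
    simp [hidx]

-- A's core computation on an items list.
def pvACore (xs : List (String × Int)) : Option String :=
  match PySem.List.max? (xs.map (·.2)) (fun v => v) with
  | none => none
  | some best_val =>
    (PySem.List.sorted ((xs.filter (fun p => p.2 == best_val)).map (·.1)) position_sort_key false).head?

-- B's core computation on an items list.
def pvBCore (xs : List (String × Int)) : Option (String × Int) :=
  xs.foldl
    (fun best p =>
      match best with
      | none => some p
      | some b => some (pv_pick b p))
    none

lemma bcore_fold (t : List (String × Int)) (b : String × Int) :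
    t.foldl (fun best p => match best with | none => some p | some b => some (pv_pick b p)) (some b)
      = some (t.foldl pv_pick b) := by
  induction t generalizing b with
  | nil => rfl
  | cons x t ih => simp [List.foldl_cons, ih]

lemma bcore_cons (x : String × Int) (t : List (String × Int)) :
    pvBCore (x :: t) = some (t.foldl pv_pick x) := by
  simp [pvBCore, List.foldl_cons, bcore_fold]

lemma max?_append_singleton {l : List Int} {m v : Int}
    (h : PySem.List.max? l (fun x => x) = some m) :
    PySem.List.max? (l ++ [v]) (fun x => x) = some (if m < v then v else m) := by
  simp only [PySem.List.max?, List.foldl_append] at h ⊢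
  rw [h]
  split <;> simp_all

lemma sorted_append_singleton (c : List String) (a : String) :
    PySem.List.sorted (c ++ [a]) position_sort_key false
      = PySem.List.insertBy (fun x y => decide (position_sort_key x < position_sort_key y)) a
          (PySem.List.sorted c position_sort_key false) := by
  rw [PySem.List.sorted_eq_foldl_insertBy, PySem.List.sorted_eq_foldl_insertBy, List.foldl_append]
  rfl

lemma head?_insertBy (before : String → String → Bool) (a y : String) (ys : List String) :
    (PySem.List.insertBy before a (y :: ys)).head? = some (if before a y then a else y) := by
  simp only [PySem.List.insertBy]
  split <;> simp

-- Invariant of the running-best scan: its value is A's max, its position heads A's sorted tie list.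
lemma core_nonempty (x : String × Int) (t : List (String × Int)) :
    PySem.List.max? ((x :: t).map (·.2)) (fun v => v) = some ((t.foldl pv_pick x).2) ∧
    (PySem.List.sorted (((x :: t).filter (fun p => p.2 == (t.foldl pv_pick x).2)).map (·.1))
        position_sort_key false).head? = some ((t.foldl pv_pick x).1) := by
  induction t using List.reverseRecOn with
  | nil =>
      constructor
      · simp [PySem.List.max?]
      · simp [PySem.List.sorted, PySem.List.insertBy]
  | append_singleton t p ih =>
      obtain ⟨ih1, ih2⟩ := ih
      have hxl : x :: (t ++ [p]) = (x :: t) ++ [p] := rfl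
      rw [hxl]
      simp only [List.foldl_append, List.foldl_cons, List.foldl_nil]
      have hm1 : List.map (fun q : String × Int => q.2) [p] = [p.2] := rfl
      set w := t.foldl pv_pick x with hwdef
      have hmax : ∀ q ∈ (x :: t), q.2 ≤ w.2 := by
        intro q hq
        exact PySem.List.max?_isMax ih1 q.2 (List.mem_map_of_mem hq)
      rcases lt_trichotomy p.2 w.2 with h | h | h
      · -- p strictly worse: everything unchanged
        have hpick : pv_pick w p = w := by
          unfold pv_pick
          rw [if_neg]
          rintro (hgt | ⟨heq, _⟩) <;> omega
        rw [hpick]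
        constructor
        · rw [List.map_append, hm1, max?_append_singleton ih1, if_neg (by omega)]
        · rw [List.filter_append]
          have : [p].filter (fun q => q.2 == w.2) = [] := by
            simp only [List.filter_cons, List.filter_nil, beq_iff_eq]
            rw [if_neg (by omega)]
          rw [this, List.append_nil]
          exact ih2
      · -- tie on the value: the pitch-order key decides, first-seen wins
        have hsnd : (pv_pick w p).2 = w.2 := by
          unfold pv_pick
          split <;> omega
        have hpick1 : (pv_pick w p).1
            = if position_sort_key p.1 < position_sort_key w.1 then p.1 else w.1 := by
          simp only [pv_pick, key_eq]
          by_cases hk : position_sort_key p.1 < position_sort_key w.1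
          · rw [if_pos (Or.inr ⟨h, hk⟩), if_pos hk]
          · rw [if_neg ?_, if_neg hk]
            rintro (hgt | ⟨_, hk'⟩)
            · omega
            · exact hk hk'
        constructor
        · rw [List.map_append, hm1, max?_append_singleton ih1, if_neg (by omega), hsnd]
        · rw [hsnd, List.filter_append]
          have : [p].filter (fun q => q.2 == w.2) = [p] := by
            simp only [List.filter_cons, List.filter_nil, beq_iff_eq]
            rw [if_pos h]
          rw [this, List.map_append, List.map_cons, List.map_nil, sorted_append_singleton]
          cases hs : PySem.List.sorted (((x :: t).filter (fun q => q.2 == w.2)).map (·.1))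
              position_sort_key false with
          | nil => rw [hs] at ih2; simp at ih2
          | cons y ys =>
              rw [hs] at ih2
              simp only [List.head?_cons, Option.some.injEq] at ih2
              rw [head?_insertBy, ih2, hpick1]
              simp only [decide_eq_true_eq]
      · -- p strictly better: it is the unique maximal element
        have hpick : pv_pick w p = p := by
          unfold pv_pick
          rw [if_pos (Or.inl h)]
        rw [hpick]
        constructor
        · rw [List.map_append, hm1, max?_append_singleton ih1, if_pos h]
        · rw [List.filter_append]
          have h1 : (x :: t).filter (fun q => q.2 == p.2) = [] := by
            rw [List.filter_eq_nil_iff]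
            intro q hq
            have := hmax q hq
            simp only [beq_iff_eq]
            omega
          have h2 : [p].filter (fun q => q.2 == p.2) = [p] := by
            simp
          rw [h1, h2, List.nil_append, List.map_cons, List.map_nil]
          simp [PySem.List.sorted, PySem.List.insertBy]

lemma core_eq (xs : List (String × Int)) : pvACore xs = (pvBCore xs).map (·.1) := by
  match xs with
  | [] => rfl
  | x :: t =>
      rcases core_nonempty x t with ⟨h1, h2⟩
      rw [bcore_cons]
      simp only [pvACore, h1, Option.map_some, h2]

-- ===== VERDICT (by name: the statement is the Claim_ definition above) =====
-- Bridges from the port bodies to the core functions (definitional).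
lemma portA_ip (player : List (String × List (String × Int))) :
    best_ip_position player
      = (if (PySem.Dict.ofList (((PySem.Dict.ofList player).get? "position_ratings").getD [])).items = []
         then none
         else pvACore (PySem.Dict.ofList (((PySem.Dict.ofList player).get? "position_ratings").getD [])).items) := rfl

lemma portA_top (player : List (String × List (String × Int))) :
    best_oop_position player
      = (if (PySem.Dict.ofList (((PySem.Dict.ofList player).get? "position_ratings_oop").getD [])).items = []
         then best_ip_position player
         else pvACore (PySem.Dict.ofList (((PySem.Dict.ofList player).get? "position_ratings_oop").getD [])).items) := rfl

lemma portB_top (player : List (String × List (String × Int))) :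
    best_oop_position_alt player
      = (match pvBCore (PySem.Dict.ofList (((PySem.Dict.ofList player).get? "position_ratings_oop").getD [])).items with
         | some b => some b
         | none => pvBCore (PySem.Dict.ofList (((PySem.Dict.ofList player).get? "position_ratings").getD [])).items
         : Option (String × Int)).map (fun b => b.1) := rfl

theorem best_oop_position_spec : Claim_equal_best_oop_position := by
  intro player _
  show best_oop_position player = best_oop_position_alt player
  rw [portA_top, portB_top, portA_ip]
  cases hoop : (PySem.Dict.ofList (((PySem.Dict.ofList player).get? "position_ratings_oop").getD [])).items with
  | nil =>
      rw [if_pos rfl]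
      show (if (PySem.Dict.ofList (((PySem.Dict.ofList player).get? "position_ratings").getD [])).items = []
            then none
            else pvACore (PySem.Dict.ofList (((PySem.Dict.ofList player).get? "position_ratings").getD [])).items)
          = (pvBCore (PySem.Dict.ofList (((PySem.Dict.ofList player).get? "position_ratings").getD [])).items).map (fun b => b.1)
      cases hip : (PySem.Dict.ofList (((PySem.Dict.ofList player).get? "position_ratings").getD [])).items with
      | nil => rfl
      | cons x t => rw [if_neg (by simp), core_eq]
  | cons x t =>
      rw [if_neg (by simp), core_eq, bcore_cons]
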